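-- pv_equiv track=rewrite | github.com/TreeinRandomForest/SummitDemo2019 | speech2text/text2value.py | split_dollars_cents
-- ===== SOURCE A (Python) =====
-- def split_dollars_cents(text):
--
--     dollars = []
--     cents = []
--     flag = False
--     for j in text.split():
--         if j == 'dollars' or j == 'dollar':
--             flag = True
--             continue
--         if flag == False:
--             dollars.append(j)
--         if flag == True:
--             cents.append(j)
--
--     dollars = " ".join(dollars)
--     cents = " ".join(cents)
--
--     return dollars, cents
-- ===== SOURCE B (Python) =====
-- def split_dollars_cents(text):
--     words = text.split()
--     idx = next((i for i, w in enumerate(words) if w in ('dollar', 'dollars')), len(words))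
--     dollars = " ".join(words[:idx])
--     cents = " ".join(w for w in words[idx + 1:] if w not in ('dollar', 'dollars'))
--     return dollars, cents
-- ===== Notes on version B (the rewrite author's own statement) =====
-- stated objective: simpler
-- what changed: Replaces the stateful flag loop with locate-the-first-dollar-token, then slice words[:idx] for dollars and filter the tail slice for cents.
import Mathlib
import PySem

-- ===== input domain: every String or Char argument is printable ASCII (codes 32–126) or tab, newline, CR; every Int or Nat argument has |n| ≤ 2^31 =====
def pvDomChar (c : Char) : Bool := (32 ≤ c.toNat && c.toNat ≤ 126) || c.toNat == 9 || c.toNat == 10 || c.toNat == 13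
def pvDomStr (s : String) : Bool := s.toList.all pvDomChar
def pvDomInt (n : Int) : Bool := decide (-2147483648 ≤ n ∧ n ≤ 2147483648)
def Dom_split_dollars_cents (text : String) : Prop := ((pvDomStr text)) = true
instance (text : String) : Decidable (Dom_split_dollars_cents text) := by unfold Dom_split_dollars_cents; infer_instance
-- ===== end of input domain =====

-- B replaces A's stateful flag loop by locating the first 'dollar(s)' token and slicing/filtering around it (simpler decomposition).

-- ===== PORT A =====
-- loop body of A: flag set on a dollar word (continue), else append by flag
def pvStepA (st : List String × List String × Bool) (j : String) : List String × List String × Bool :=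
  if j == "dollars" || j == "dollar" then (st.1, st.2.1, true)
  else
    let d := if st.2.2 == false then st.1 ++ [j] else st.1
    let c := if st.2.2 == true then st.2.1 ++ [j] else st.2.1
    (d, c, st.2.2)

def split_dollars_cents (text : String) : String × String :=
  let st := (PySem.Str.split₀ text).foldl pvStepA ([], [], false)
  (PySem.Str.join " " st.1, PySem.Str.join " " st.2.1)

-- ===== PORT B =====
def pvIsDollar (w : String) : Bool := w == "dollar" || w == "dollars"

def split_dollars_cents_alt (text : String) : String × String :=
  let words := PySem.Str.split₀ text
  let idx := (words.findIdx? pvIsDollar).getD words.length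
  (PySem.Str.join " " (words.take idx),
   PySem.Str.join " " ((words.drop (idx + 1)).filter (fun w => !pvIsDollar w)))

-- ===== PRECONDITION & SPEC =====
def Spec_split_dollars_cents (text : String) (out : String × String) : Prop := out = split_dollars_cents_alt text
instance (text : String) (out : String × String) : Decidable (Spec_split_dollars_cents text out) := by unfold Spec_split_dollars_cents; infer_instance

-- ===== CLAIM (what is proved, stated in full; the proofs are below) =====
def Claim_equal_split_dollars_cents : Prop := ∀ (text : String), Dom_split_dollars_cents text → Spec_split_dollars_cents text (split_dollars_cents text)

-- ===== LEMMAS AND PROOFS =====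

lemma pvStepA_dollar_eq (st : List String × List String × Bool) (j : String)
    (h : pvIsDollar j = true) : pvStepA st j = (st.1, st.2.1, true) := by
  simp only [pvIsDollar, Bool.or_eq_true, beq_iff_eq] at h
  rcases h with h | h <;> simp [pvStepA, h]

lemma pvFoldA_true (ws : List String) (d c : List String) :
    ws.foldl pvStepA (d, c, true) = (d, c ++ ws.filter (fun w => !pvIsDollar w), true) := by
  induction ws generalizing c with
  | nil => simp
  | cons w ws ih =>
    by_cases h : pvIsDollar w = true
    · simp [List.foldl_cons, pvStepA_dollar_eq _ _ h, ih, h]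
    · have h' : ¬ w = "dollar" ∧ ¬ w = "dollars" := by
        simpa [pvIsDollar] using h
      simp [List.foldl_cons, pvStepA, pvIsDollar, h'.1, h'.2, ih]

lemma pvFoldA_false (ws : List String) (d c : List String) :
    ws.foldl pvStepA (d, c, false) =
      (d ++ ws.take ((ws.findIdx? pvIsDollar).getD ws.length),
       c ++ (ws.drop ((ws.findIdx? pvIsDollar).getD ws.length + 1)).filter (fun w => !pvIsDollar w),
       (ws.findIdx? pvIsDollar).isSome) := by
  induction ws generalizing d with
  | nil => simp
  | cons w ws ih =>
    by_cases h : pvIsDollar w = true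
    · simp [List.foldl_cons, pvStepA_dollar_eq _ _ h, pvFoldA_true, List.findIdx?_cons, h]
    · have h' : pvIsDollar w = false := by simp_all
      have hne : ¬ w = "dollar" ∧ ¬ w = "dollars" := by
        simpa [pvIsDollar] using h
      have hstep : pvStepA (d, c, false) w = (d ++ [w], c, false) := by
        simp [pvStepA, hne.1, hne.2]
      simp [List.foldl_cons, hstep, ih, List.findIdx?_cons, h']

-- ===== VERDICT (by name: the statement is the Claim_ definition above) =====
theorem split_dollars_cents_spec : Claim_equal_split_dollars_cents := by
  intro text _
  unfold Spec_split_dollars_cents split_dollars_cents split_dollars_cents_alt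
  simp only [pvFoldA_false, List.nil_append]
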